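-- pv_equiv track=rewrite | github.com/TaDpoleO/Python-Education | Yandex/Algorithm Training/Algorithm Training 4/Warm-up/F.py | answer
-- ===== SOURCE A (Python) =====
-- def correct_Man_On_Floor(stack):
--     while stack and stack[-1] == 0:
--         stack.pop()
--
-- def answer(max_man_in_elevator, stack):
--     res_time = 0
--     while stack:
--         res_time += len(stack)*2
--
--         if stack[-1] > max_man_in_elevator:
--             count = (stack[-1] // max_man_in_elevator)-1
--             res_time += len(stack)*2*count
--             stack[-1] -= max_man_in_elevator*count
--
--         curr_man_in_elevator = 0
--         while (curr_man_in_elevator < max_man_in_elevator) and stack: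
--             if stack[-1]+curr_man_in_elevator <= max_man_in_elevator:
--                 curr_man_in_elevator += stack.pop()
--                 correct_Man_On_Floor(stack)
--             else:
--                 stack[-1] -= (max_man_in_elevator-curr_man_in_elevator)
--                 curr_man_in_elevator = max_man_in_elevator
--
--     return res_time
-- ===== SOURCE B (Python) =====
-- def answer(max_man_in_elevator, stack):
--     # One pass over the floors from the top: t is the index of the round trip on
--     # which the current floor is cleared, P the number of people on floors at or
--     # above it.  A floor with people is cleared on trip max(t', ceil(P'/cap))
--     # where t' is the previous floor's trip (+1 if that trip left exactly full);
--     # an empty floor is cleared together with the floor above it.  Each floor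
--     # costs 2 time units per trip that still has to reach it.
--     # (Return value only: unlike A, does not mutate `stack`.)
--     total = 0
--     P = 0
--     t = 0
--     for x in reversed(stack):
--         if x != 0:
--             loads = (P + x + max_man_in_elevator - 1) // max_man_in_elevator
--             if P < max_man_in_elevator * t:
--                 t = max(t, loads)
--             else:
--                 t = max(t + 1, loads)
--         P += x
--         total += 2 * t
--     return total
-- ===== Notes on version B (the rewrite author's own statement) =====
-- stated objective: alternative
-- what changed: Replaces the trip-by-trip elevator simulation (nested while loops popping and mutating the stack) by a single non-mutating pass over the floors from the top, computing for each floor the index of the round trip on which it is cleared (a max/ceiling recurrence on running suffix sums) and adding 2 time units per trip per floor.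
-- intended difference: On stacks whose last (top) floor holds 0 people, A still rides once up to the original top and charges 2 per trailing empty floor (returns B's value + 2*(number of trailing zero floors)); B skips floors nobody is on, which is the intended minimum time. — e.g. on answer(1, [0]): A returns 2, B returns 0
-- outside the precondition, e.g. on answer(0, []): A returns 0, B returns 0; on answer(0, [1]): A raises ZeroDivisionError, B raises ZeroDivisionError
import Mathlib
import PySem

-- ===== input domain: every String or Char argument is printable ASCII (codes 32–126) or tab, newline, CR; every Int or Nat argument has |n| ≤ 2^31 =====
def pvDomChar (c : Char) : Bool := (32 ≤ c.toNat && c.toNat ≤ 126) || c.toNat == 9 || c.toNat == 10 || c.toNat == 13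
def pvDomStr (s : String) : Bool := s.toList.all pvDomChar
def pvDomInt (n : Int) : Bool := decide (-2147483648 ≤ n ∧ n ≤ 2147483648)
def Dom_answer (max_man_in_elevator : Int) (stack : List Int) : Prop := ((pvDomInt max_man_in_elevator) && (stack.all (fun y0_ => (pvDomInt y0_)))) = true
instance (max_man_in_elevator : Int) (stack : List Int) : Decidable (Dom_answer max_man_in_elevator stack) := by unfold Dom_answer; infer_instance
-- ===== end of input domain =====

-- B replaces A's trip-by-trip elevator simulation by a one-pass per-floor trip-index recurrence;
-- equivalence is about the RETURN value only (A empties the Python list `stack` in place, B does not mutate it).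


-- ===== PORT A =====
-- A pops from the END of the Python list; the port keeps the stack reversed internally
-- (top of the stack = head of the list); each step is the same operation as its Python line.
-- aCorrect = correct_Man_On_Floor (pop while the top floor is 0); aInner = the inner
-- `while (curr_man_in_elevator < max) and stack` loop; aOuter = the outer `while stack` loop,
-- whose fuel argument only makes the recursion total (2*len+2 is proved sufficient under Pre_).
def aCorrect : List Int → List Int
  | [] => []
  | h :: t => if h = 0 then aCorrect t else h :: t

theorem aCorrect_length_le : ∀ r : List Int, (aCorrect r).length ≤ r.length := by
  intro r
  induction r with
  | nil => simp [aCorrect]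
  | cons h t ih => simp only [aCorrect, List.length_cons]; split; · omega
                   · simp

def aInner (c curr : Int) (r : List Int) : List Int :=
  if curr < c then
    match r with
    | [] => []
    | h :: t =>
      if h + curr ≤ c then aInner c (curr + h) (aCorrect t)
      else (h - (c - curr)) :: t
  else r
termination_by r.length
decreasing_by
  have := aCorrect_length_le t
  simp
  omega

def aOuter : Nat → Int → Int → List Int → Int
  | 0, _, res, _ => res
  | _ + 1, _, res, [] => res
  | fuel + 1, c, res, h :: t =>
    let r := h :: t
    let res1 := res + (r.length : Int) * 2
    if h > c then
      let count := PySem.Int.floordiv h c - 1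
      let res2 := res1 + (r.length : Int) * 2 * count
      aOuter fuel c res2 (aInner c 0 ((h - c * count) :: t))
    else
      aOuter fuel c res1 (aInner c 0 r)

def answer (max_man_in_elevator : Int) (stack : List Int) : Int :=
  aOuter (2 * stack.length + 2) max_man_in_elevator 0 stack.reverse

def answer_alt (max_man_in_elevator : Int) (stack : List Int) : Int :=
  (stack.reverse.foldl
    (fun (s : Int × Int × Int) x =>
      let t :=
        if x ≠ 0 then
          (let loads := PySem.Int.floordiv (s.2.1 + x + max_man_in_elevator - 1) max_man_in_elevator
           if s.2.1 < max_man_in_elevator * s.2.2 then max s.2.2 loads else max (s.2.2 + 1) loads)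
        else s.2.2
      (s.1 + 2 * t, s.2.1 + x, t)) ((0 : Int), (0 : Int), (0 : Int))).1

-- ===== PRECONDITION & SPEC =====
-- Pre_ excludes non-positive capacity only: there A raises ZeroDivisionError or loops forever
-- on every non-empty stack (on the empty stack both A and B return 0).
def Pre_answer (max_man_in_elevator : Int) (stack : List Int) : Prop :=
  1 ≤ max_man_in_elevator
instance (max_man_in_elevator : Int) (stack : List Int) : Decidable (Pre_answer max_man_in_elevator stack) := by unfold Pre_answer; infer_instance
def pvWitness_answer : Int × List Int := (2, [3, -1, 5])

-- On stacks whose last (top) floor holds 0 people, A still rides once up to the original top and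
-- charges 2 per trailing empty floor (returns B's value + 2*(number of trailing zero floors));
-- B skips floors nobody is on, which is the intended minimum time.
def D_answer (max_man_in_elevator : Int) (stack : List Int) : Prop :=
  stack.getLast? = some 0
instance (max_man_in_elevator : Int) (stack : List Int) : Decidable (D_answer max_man_in_elevator stack) := by unfold D_answer; infer_instance

def Spec_answer (max_man_in_elevator : Int) (stack : List Int) (out : Int) : Prop :=
  ¬ D_answer max_man_in_elevator stack → out = answer_alt max_man_in_elevator stack
instance (max_man_in_elevator : Int) (stack : List Int) (out : Int) : Decidable (Spec_answer max_man_in_elevator stack out) := by unfold Spec_answer; infer_instance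

def pvDiffWitness_answer : Int × List Int := (1, [0])
def pvDiffWitnessOut_answer : Int × Int := (2, 0)

-- ===== CLAIM (what is proved, stated in full; the proofs are below) =====
def Claim_unchanged_answer : Prop := ∀ (max_man_in_elevator : Int) (stack : List Int), Dom_answer max_man_in_elevator stack → Pre_answer max_man_in_elevator stack → Spec_answer max_man_in_elevator stack (answer max_man_in_elevator stack)
def Claim_changed_answer : Prop := Dom_answer (pvDiffWitness_answer.1) (pvDiffWitness_answer.2) ∧ Pre_answer (pvDiffWitness_answer.1) (pvDiffWitness_answer.2) ∧ D_answer (pvDiffWitness_answer.1) (pvDiffWitness_answer.2) ∧ answer (pvDiffWitness_answer.1) (pvDiffWitness_answer.2) = pvDiffWitnessOut_answer.1 ∧ answer_alt (pvDiffWitness_answer.1) (pvDiffWitness_answer.2) = pvDiffWitnessOut_answer.2 ∧ pvDiffWitnessOut_answer.1 ≠ pvDiffWitnessOut_answer.2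
def Claim_exact_answer : Prop := ∀ (max_man_in_elevator : Int) (stack : List Int), Dom_answer max_man_in_elevator stack → Pre_answer max_man_in_elevator stack → D_answer max_man_in_elevator stack → answer max_man_in_elevator stack ≠ answer_alt max_man_in_elevator stack

-- ===== LEMMAS AND PROOFS =====
def fCeil (c x : Int) : Int := PySem.Int.floordiv (x + c - 1) c

theorem fCeil_add_c (c x : Int) (hc : 1 ≤ c) : fCeil c (x + c) = fCeil c x + 1 := by
  unfold fCeil PySem.Int.floordiv
  have h : x + c + c - 1 = (x + c - 1) + 1 * c := by ring
  rw [h, Int.add_mul_fdiv_right _ _ (by omega)]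

theorem fdiv_le_one (y c : Int) (hc : 1 ≤ c) (h1 : y < 2 * c) : y.fdiv c ≤ 1 := by
  rw [Int.fdiv_eq_ediv]
  have h2 : y / c < 2 := (Int.ediv_lt_iff_lt_mul (by omega)).2 (by omega)
  simp only [if_pos (Or.inl (by omega : (0:Int) ≤ c))]
  omega

theorem fdiv_ge_one (h c : Int) (hc : 1 ≤ c) (hh : c ≤ h) : 1 ≤ h.fdiv c := by
  rw [Int.fdiv_eq_ediv]
  have h1 : 1 ≤ h / c := (Int.le_ediv_iff_mul_le (by omega)).2 (by omega)
  simp only [if_pos (Or.inl (by omega : (0:Int) ≤ c))]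
  omega

theorem fdiv_ge_two (h c : Int) (hc : 1 ≤ c) (hh : 2 * c ≤ h) : 2 ≤ h.fdiv c := by
  rw [Int.fdiv_eq_ediv]
  have h1 : 2 ≤ h / c := (Int.le_ediv_iff_mul_le (by omega)).2 (by omega)
  simp only [if_pos (Or.inl (by omega : (0:Int) ≤ c))]
  omega

theorem fCeil_le_one (c x : Int) (hc : 1 ≤ c) (h : x ≤ c) : fCeil c x ≤ 1 :=
  fdiv_le_one _ _ hc (by omega)

theorem fCeil_pos (c x : Int) (hc : 1 ≤ c) (h : 0 < x) : 1 ≤ fCeil c x :=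
  fdiv_ge_one _ _ hc (by omega)

theorem fCeil_ge_two (c x : Int) (hc : 1 ≤ c) (h : c < x) : 2 ≤ fCeil c x :=
  fdiv_ge_two _ _ hc (by omega)

def bStep (c P t x : Int) : Int :=
  if x = 0 then t
  else if P < c * t then max t (fCeil c (P + x))
  else max (t + 1) (fCeil c (P + x))

def gT (c : Int) (P t : Int) : List Int → Int
  | [] => 0
  | x :: rest => 2 * bStep c P t x + gT c (P + x) (bStep c P t x) rest

theorem bStep_shift (c P t x : Int) (hc : 1 ≤ c) :
    bStep c (P + c) (t + 1) x = bStep c P t x + 1 := by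
  unfold bStep
  have e1 : c * (t + 1) = c * t + c := by ring
  have e2 : P + c + x = (P + x) + c := by ring
  rw [e2, fCeil_add_c c (P + x) hc]
  by_cases hx : x = 0
  · simp [hx]
  · rw [if_neg hx, if_neg hx]
    split_ifs <;> omega

theorem gT_shift (c : Int) (hc : 1 ≤ c) : ∀ (s : List Int) (P t : Int),
    gT c (P + c) (t + 1) s = 2 * (s.length : Int) + gT c P t s := by
  intro s
  induction s with
  | nil => intro P t; simp [gT]
  | cons x rest ih =>
    intro P t
    simp only [gT, bStep_shift c P t x hc, List.length_cons]
    have e : P + c + x = (P + x) + c := by ring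
    rw [e, ih (P + x) (bStep c P t x)]
    push_cast
    ring

theorem gT_zero_drop (c : Int) : ∀ (s : List Int) (P : Int),
    gT c P 1 s = 2 * ((s.length : Int) - ((aCorrect s).length : Int)) + gT c P 1 (aCorrect s) := by
  intro s
  induction s with
  | nil => intro P; simp [gT, aCorrect]
  | cons x rest ih =>
    intro P
    by_cases hx : x = 0
    · subst hx
      simp only [aCorrect, if_pos rfl, gT, List.length_cons]
      rw [show bStep c P 1 0 = 1 by unfold bStep; simp, add_zero, ih P]
      have := aCorrect_length_le rest
      push_cast
      omega
    · simp only [aCorrect, if_neg hx]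
      ring_nf

theorem gT_one_zero (c : Int) (hc : 1 ≤ c) (s : List Int) (hs : s.head? ≠ some 0) :
    gT c 0 1 s = gT c 0 0 s := by
  cases s with
  | nil => rfl
  | cons x rest =>
    have hx : x ≠ 0 := by simpa using hs
    simp only [gT]
    have e : bStep c 0 1 x = bStep c 0 0 x := by
      unfold bStep
      rw [if_neg hx, if_neg hx, if_pos (by omega : (0:Int) < c * 1), if_neg (by omega : ¬ (0:Int) < c * 0)]
      omega
    rw [e]

theorem aInner_gT (c : Int) (hc : 1 ≤ c) : ∀ (curr : Int) (r : List Int), curr ≤ c →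
    gT c curr 1 r = 2 * (r.length : Int) + gT c 0 0 (aInner c curr r) := by
  intro curr r
  fun_induction aInner with
  | case1 curr hlt =>
    intro _
    simp [gT]
  | case2 curr hlt h t hle ih =>
    intro hcc
    have hb : bStep c curr 1 h = 1 := by
      unfold bStep
      by_cases hx : h = 0
      · simp [hx]
      · rw [if_neg hx, if_pos (by omega : curr < c * 1)]
        have := fCeil_le_one c (curr + h) hc (by omega)
        omega
    have ihp := ih (by omega)
    have hz := gT_zero_drop c t (curr + h)
    have hlen := aCorrect_length_le t
    simp only [gT, hb, List.length_cons]
    rw [hz, ihp]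
    push_cast
    omega
  | case3 curr hlt h t hle =>
    intro hcc
    have hh' : 0 < h - (c - curr) := by omega
    have hT2 : 2 ≤ fCeil c (curr + h) := fCeil_ge_two c (curr + h) hc (by omega)
    have hb : bStep c curr 1 h = fCeil c (curr + h) := by
      unfold bStep
      rw [if_neg (by omega : ¬ h = 0), if_pos (by omega : curr < c * 1)]
      omega
    have hf1 : 1 ≤ fCeil c (h - (c - curr)) := fCeil_pos c _ hc hh'
    have hfe : fCeil c (curr + h) = fCeil c (h - (c - curr)) + 1 := by
      rw [show curr + h = (h - (c - curr)) + c by ring, fCeil_add_c c _ hc]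
    have hb' : bStep c 0 0 (h - (c - curr)) = fCeil c (h - (c - curr)) := by
      unfold bStep
      rw [if_neg (by omega : ¬ (h - (c - curr)) = 0), if_neg (by omega : ¬ (0:Int) < c * 0)]
      simp only [zero_add]
      omega
    simp only [gT, hb, hb', List.length_cons, zero_add]
    rw [hfe, show curr + h = (h - (c - curr)) + c by ring,
      gT_shift c hc t (h - (c - curr)) (fCeil c (h - (c - curr)))]
    push_cast
    ring
  | case4 curr r hge =>
    intro hcc
    have hcur : curr = c := by omega
    have hs := gT_shift c hc r 0 0
    simp only [zero_add] at hs
    rw [hcur]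
    exact hs

theorem gT_head_shift_one (c : Int) (hc : 1 ≤ c) (y : Int) (hy : 0 < y) (t : List Int) :
    gT c 0 0 ((y + c) :: t) = 2 * (1 + (t.length : Int)) + gT c 0 0 (y :: t) := by
  have hf : 1 ≤ fCeil c y := fCeil_pos c y hc hy
  have hb : bStep c 0 0 y = fCeil c y := by
    unfold bStep
    rw [if_neg (by omega : ¬ y = 0), if_neg (by omega : ¬ (0:Int) < c * 0)]
    simp only [zero_add]
    omega
  have hb' : bStep c 0 0 (y + c) = fCeil c y + 1 := by
    unfold bStep
    rw [if_neg (by omega : ¬ y + c = 0), if_neg (by omega : ¬ (0:Int) < c * 0)]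
    simp only [zero_add]
    rw [fCeil_add_c c y hc]
    omega
  simp only [gT, hb, hb', List.length_cons, zero_add]
  rw [gT_shift c hc t y (fCeil c y)]
  push_cast
  ring

theorem gT_head_shift (c : Int) (hc : 1 ≤ c) (x : Int) (hx : 0 < x) (t : List Int) : ∀ (k : Nat),
    gT c 0 0 ((x + c * k) :: t) = 2 * (1 + (t.length : Int)) * k + gT c 0 0 (x :: t) := by
  intro k
  induction k with
  | zero => simp
  | succ k ih =>
    have e : x + c * ((k : Nat) + 1 : Nat) = (x + c * k) + c := by push_cast; ring
    rw [e, gT_head_shift_one c hc (x + c * k) (by positivity) t, ih]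
    push_cast
    ring

theorem aCorrect_head : ∀ r : List Int, (aCorrect r).head? ≠ some 0 := by
  intro r
  induction r with
  | nil => simp [aCorrect]
  | cons h t ih =>
    simp only [aCorrect]
    split
    · exact ih
    · simp; omega

theorem aInner_length_le (c : Int) : ∀ (curr : Int) (r : List Int),
    (aInner c curr r).length ≤ r.length := by
  intro curr r
  fun_induction aInner with
  | case1 => simp
  | case2 curr hlt h t hle ih =>
    have := aCorrect_length_le t
    simp only [List.length_cons]
    omega
  | case3 => simp
  | case4 => omega

theorem aInner_length_pop (c : Int) (h : Int) (t : List Int) (hc : 0 < c) (hh : h + 0 ≤ c) :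
    (aInner c 0 (h :: t)).length ≤ t.length := by
  rw [aInner]
  rw [if_pos hc]
  simp only [if_pos (by omega : h + 0 ≤ c)]
  have := aInner_length_le c (0 + h) (aCorrect t)
  have := aCorrect_length_le t
  omega

theorem aInner_head (c : Int) : ∀ (curr : Int) (r : List Int),
    r.head? ≠ some 0 → (aInner c curr r).head? ≠ some 0 := by
  intro curr r
  fun_induction aInner with
  | case1 => simp
  | case2 curr hlt h t hle ih =>
    intro _
    exact ih (aCorrect_head t)
  | case3 curr hlt h t hle =>
    intro _
    simp
    omega
  | case4 => exact id

def muOut (c : Int) : List Int → Nat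
  | [] => 0
  | h :: t => 2 * (h :: t).length + (if c < h then 1 else 0)

theorem muOut_le (c : Int) : ∀ r : List Int, muOut c r ≤ 2 * r.length + 1 := by
  intro r
  cases r with
  | nil => simp [muOut]
  | cons h t => simp only [muOut]; split <;> omega

theorem aOuter_gT (c : Int) (hc : 1 ≤ c) : ∀ (fuel : Nat) (r : List Int) (res : Int),
    r.head? ≠ some 0 → muOut c r ≤ fuel →
    aOuter fuel c res r = res + gT c 0 0 r := by
  intro fuel
  induction fuel with
  | zero =>
    intro r res hhd hmu
    cases r with
    | nil => simp [aOuter, gT]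
    | cons h t => simp [muOut] at hmu
  | succ fuel ih =>
    intro r res hhd hmu
    cases r with
    | nil => simp [aOuter, gT]
    | cons h t =>
      have hhne : h ≠ 0 := by simpa using hhd
      have hmu' : 2 * t.length + 2 + (if c < h then 1 else 0) ≤ fuel + 1 := by
        simpa [muOut] using hmu
      by_cases hbig : c < h
      · -- count branch
        have hstep : aOuter (fuel + 1) c res (h :: t) =
            aOuter fuel c (res + ((h :: t).length : Int) * 2
              + ((h :: t).length : Int) * 2 * (PySem.Int.floordiv h c - 1))
              (aInner c 0 ((h - c * (PySem.Int.floordiv h c - 1)) :: t)) := by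
          simp only [aOuter, if_pos hbig]
        set q := PySem.Int.floordiv h c with hqdef
        have hq : q = h.fdiv c := rfl
        have hq1 : 1 ≤ q := by rw [hq]; exact fdiv_ge_one h c hc (by omega)
        have hfd : c * h.fdiv c + h.fmod c = h := Int.fdiv_add_fmod h c
        have hm0 : 0 ≤ h.fmod c := Int.fmod_nonneg (by omega) (by omega)
        have hmlt : h.fmod c < c := Int.fmod_lt_of_pos h (by omega)
        set h1 : Int := h - c * (q - 1) with hh1def
        have hh1 : h1 = h.fmod c + c := by
          rw [hh1def, hq]
          linear_combination -hfd
        have hc1 : c ≤ h1 := by omega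
        have hk : ((q - 1).toNat : Int) = q - 1 := Int.toNat_of_nonneg (by omega)
        have hgo : gT c 0 0 (h :: t) = 2 * (1 + (t.length : Int)) * (q - 1) + gT c 0 0 (h1 :: t) := by
          have := gT_head_shift c hc h1 (by omega) t (q - 1).toNat
          rw [hk] at this
          rw [show h = h1 + c * (q - 1) by rw [hh1def]; ring]
          exact this
        have hone : gT c 0 0 (h1 :: t) = gT c 0 1 (h1 :: t) :=
          (gT_one_zero c hc (h1 :: t) (by simp; omega)).symm
        have hinner := aInner_gT c hc 0 (h1 :: t) (by omega)
        have hhd2 : (aInner c 0 (h1 :: t)).head? ≠ some 0 :=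
          aInner_head c 0 (h1 :: t) (by simp; omega)
        have hmu2 : muOut c (aInner c 0 (h1 :: t)) ≤ fuel := by
          rw [if_pos hbig] at hmu'
          by_cases hsm : h1 ≤ c
          · have hpop := aInner_length_pop c h1 t (by omega) (by omega)
            have := muOut_le c (aInner c 0 (h1 :: t))
            omega
          · have : aInner c 0 (h1 :: t) = (h1 - (c - 0)) :: t := by
              rw [aInner, if_pos (by omega : (0:Int) < c), if_neg (by omega)]
            rw [this]
            simp only [muOut, List.length_cons]
            rw [if_neg (by omega)]
            omega
        rw [hstep, ih _ _ hhd2 hmu2, hgo, hone, hinner]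
        simp only [List.length_cons]
        push_cast
        ring
      · -- ordinary branch
        have hstep : aOuter (fuel + 1) c res (h :: t) =
            aOuter fuel c (res + ((h :: t).length : Int) * 2) (aInner c 0 (h :: t)) := by
          simp only [aOuter, if_neg hbig]
        have hone : gT c 0 0 (h :: t) = gT c 0 1 (h :: t) :=
          (gT_one_zero c hc (h :: t) hhd).symm
        have hinner := aInner_gT c hc 0 (h :: t) (by omega)
        have hhd2 : (aInner c 0 (h :: t)).head? ≠ some 0 := aInner_head c 0 (h :: t) hhd
        have hmu2 : muOut c (aInner c 0 (h :: t)) ≤ fuel := by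
          rw [if_neg hbig] at hmu'
          have hpop := aInner_length_pop c h t (by omega) (by omega)
          have := muOut_le c (aInner c 0 (h :: t))
          omega
        rw [hstep, ih _ _ hhd2 hmu2, hone, hinner]
        simp only [List.length_cons]
        push_cast
        ring

theorem foldl_gT (c : Int) : ∀ (r : List Int) (tot P t : Int),
    (r.foldl (fun (s : Int × Int × Int) x =>
      let t' :=
        if x ≠ 0 then
          (let loads := PySem.Int.floordiv (s.2.1 + x + c - 1) c
           if s.2.1 < c * s.2.2 then max s.2.2 loads else max (s.2.2 + 1) loads)
        else s.2.2
      (s.1 + 2 * t', s.2.1 + x, t')) (tot, P, t)).1 = tot + gT c P t r := by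
  intro r
  induction r with
  | nil => intro tot P t; simp [gT]
  | cons x rest ih =>
    intro tot P t
    simp only [List.foldl_cons, gT]
    have hb : (if x ≠ 0 then
          (let loads := PySem.Int.floordiv (P + x + c - 1) c
           if P < c * t then max t loads else max (t + 1) loads)
        else t) = bStep c P t x := by
      unfold bStep fCeil
      by_cases hx : x = 0
      · simp [hx]
      · rw [if_pos hx, if_neg hx]
    rw [hb, ih]
    ring

theorem answer_alt_eq_gT (c : Int) (stack : List Int) :
    answer_alt c stack = gT c 0 0 stack.reverse := by
  unfold answer_alt
  rw [foldl_gT c stack.reverse 0 0 0]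
  ring

theorem answer_spec' (c : Int) (stack : List Int)
    (hc : 1 ≤ c) (hnd : ¬ stack.getLast? = some 0) :
    answer c stack = answer_alt c stack := by
  rw [answer, answer_alt_eq_gT]
  have hmu : muOut c stack.reverse ≤ 2 * stack.length + 2 := by
    have := muOut_le c stack.reverse
    simp at this
    omega
  rw [aOuter_gT c hc _ _ 0 (by rw [List.head?_reverse]; exact hnd) hmu]
  ring

theorem gT_zero_zero_drop (c : Int) : ∀ (s : List Int),
    gT c 0 0 s = gT c 0 0 (aCorrect s) := by
  intro s
  induction s with
  | nil => rfl
  | cons x rest ih =>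
    by_cases hx : x = 0
    · subst hx
      simp only [aCorrect, if_pos rfl, gT]
      rw [show bStep c 0 0 0 = 0 by unfold bStep; simp, add_zero]
      simpa using ih
    · simp [aCorrect, if_neg hx]

theorem answer_tight' (c : Int) (stack : List Int)
    (hc : 1 ≤ c) (hd : stack.getLast? = some 0) :
    answer c stack ≠ answer_alt c stack := by
  have hrev : stack.reverse.head? = some 0 := by rw [List.head?_reverse]; exact hd
  obtain ⟨t, hr⟩ : ∃ t, stack.reverse = 0 :: t := by
    cases hrt : stack.reverse with
    | nil => rw [hrt] at hrev; simp at hrev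
    | cons h t => rw [hrt] at hrev; simp at hrev; exact ⟨t, by rw [hrev]⟩
  have hlen : stack.length = t.length + 1 := by
    have := congrArg List.length hr
    simpa using this
  rw [answer, answer_alt_eq_gT, hr]
  have hstep : aOuter (2 * stack.length + 2) c 0 ((0 : Int) :: t) =
      aOuter (2 * stack.length + 1) c (0 + (((0:Int) :: t).length : Int) * 2)
        (aInner c 0 ((0 : Int) :: t)) := by
    rw [show 2 * stack.length + 2 = (2 * stack.length + 1) + 1 by ring]
    simp only [aOuter, if_neg (by omega : ¬ (0 : Int) > c)]
  have hin : aInner c 0 ((0 : Int) :: t) = aInner c 0 (aCorrect t) := by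
    rw [aInner, if_pos (by omega : (0:Int) < c), if_pos (by omega : (0:Int) + 0 ≤ c), zero_add]
  rw [hstep, hin]
  have hcth : (aCorrect t).head? ≠ some 0 := aCorrect_head t
  have hinner := aInner_gT c hc 0 (aCorrect t) (by omega)
  have hone : gT c 0 0 (aCorrect t) = gT c 0 1 (aCorrect t) :=
    (gT_one_zero c hc (aCorrect t) hcth).symm
  have hhd2 : (aInner c 0 (aCorrect t)).head? ≠ some 0 := aInner_head c 0 (aCorrect t) hcth
  have hmu2 : muOut c (aInner c 0 (aCorrect t)) ≤ 2 * stack.length + 1 := by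
    have h1 := muOut_le c (aInner c 0 (aCorrect t))
    have h2 := aInner_length_le c 0 (aCorrect t)
    have h3 := aCorrect_length_le t
    omega
  rw [aOuter_gT c hc _ _ _ hhd2 hmu2]
  have hB : gT c 0 0 ((0 : Int) :: t) = gT c 0 0 (aCorrect t) := by
    have h1 : gT c 0 0 ((0 : Int) :: t) = gT c 0 0 t := by
      simp only [gT]
      rw [show bStep c 0 0 0 = 0 by unfold bStep; simp, add_zero]
      simp
    rw [h1, gT_zero_zero_drop c t]
  rw [hB, hone, hinner]
  have hclen := aCorrect_length_le t
  simp only [List.length_cons]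
  omega

-- ===== VERDICT (by name: the statements are the Claim_ definitions above) =====
theorem answer_spec : Claim_unchanged_answer := by
  intro c stack _ hpre hnd
  exact answer_spec' c stack hpre hnd

theorem answer_changed : Claim_changed_answer := by
  unfold Claim_changed_answer
  refine ⟨by decide, by decide, by decide, ?_, by decide, by decide⟩
  show answer 1 [0] = 2
  norm_num [answer, aOuter, aInner, aCorrect]

theorem answer_tight : Claim_exact_answer := by
  intro c stack _ hpre hd
  exact answer_tight' c stack hpre hd
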